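-- pv_equiv track=rewrite | github.com/mstan/snesrecomp | tools/sneslib/commands/align.py | _find_alignment
-- ===== SOURCE A (Python) =====
-- def _find_alignment(r_trans, o_trans, max_offset=30):
--     if not r_trans or not o_trans:
--         return 0, 0, 0
--
--     best_offset = 0
--     best_score = 0
--
--     for offset in range(-max_offset, max_offset + 1):
--         score = 0
--         for r_frame, r_mode in r_trans:
--             target = r_frame + offset
--             for o_frame, o_mode in o_trans:
--                 if abs(o_frame - target) <= 2 and o_mode == r_mode:
--                     score += 1
--                     break
--         if score > best_score:
--             best_score = score
--             best_offset = offset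
--
--     return best_offset, best_score, len(r_trans)
-- ===== SOURCE B (Python) =====
-- def _find_alignment(r_trans, o_trans, max_offset=30):
--     if not r_trans or not o_trans:
--         return 0, 0, 0
--
--     # For each reference transition, collect the set of offsets (within range)
--     # at which it matches some original transition, then tally per offset.
--     counts = {}
--     for r_frame, r_mode in r_trans:
--         good = set()
--         for o_frame, o_mode in o_trans:
--             if o_mode == r_mode:
--                 d = o_frame - r_frame
--                 for off in range(d - 2, d + 3):
--                     if -max_offset <= off <= max_offset:
--                         good.add(off)
--         for off in good:
--             counts[off] = counts.get(off, 0) + 1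
--
--     best_offset = 0
--     best_score = 0
--     for off in range(-max_offset, max_offset + 1):
--         s = counts.get(off, 0)
--         if s > best_score:
--             best_offset = off
--             best_score = s
--     return best_offset, best_score, len(r_trans)
-- ===== Notes on version B (the rewrite author's own statement) =====
-- stated objective: faster
-- what changed: Instead of rescanning o_trans for every (offset, r) pair, B makes one pass over r_trans x o_trans collecting per-reference-transition the set of in-range offsets at which it matches, tallies them in a dict, and then reads the best offset off the tally.
import Mathlib
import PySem

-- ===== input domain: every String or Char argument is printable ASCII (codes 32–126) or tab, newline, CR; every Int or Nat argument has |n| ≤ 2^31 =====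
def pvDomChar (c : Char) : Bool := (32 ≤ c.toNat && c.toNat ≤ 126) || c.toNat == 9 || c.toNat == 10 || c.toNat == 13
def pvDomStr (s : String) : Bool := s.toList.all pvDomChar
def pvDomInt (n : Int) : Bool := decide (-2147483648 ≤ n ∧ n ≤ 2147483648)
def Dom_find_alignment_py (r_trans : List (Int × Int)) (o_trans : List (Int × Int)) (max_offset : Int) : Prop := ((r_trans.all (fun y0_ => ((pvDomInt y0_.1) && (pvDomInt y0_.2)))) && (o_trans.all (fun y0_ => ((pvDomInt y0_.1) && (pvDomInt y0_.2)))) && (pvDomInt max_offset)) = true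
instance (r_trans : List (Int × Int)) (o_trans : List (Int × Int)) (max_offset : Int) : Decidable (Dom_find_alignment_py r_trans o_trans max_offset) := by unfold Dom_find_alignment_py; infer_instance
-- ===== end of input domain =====

-- B replaces A's per-offset rescan of o_trans by one pass that collects, per reference
-- transition, the set of offsets at which it matches, tallied into a dict (objective: faster).

-- ===== PORT A =====
-- inner 'for o_frame, o_mode in o_trans: if …: score += 1; break' — 1 at the first match, else 0
def pvInnerA (o_trans : List (Int × Int)) (target r_mode : Int) : Int :=
  match o_trans with
  | [] => 0
  | om :: rest => if |om.1 - target| ≤ 2 ∧ om.2 = r_mode then 1 else pvInnerA rest target r_mode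

def find_alignment_py (r_trans : List (Int × Int)) (o_trans : List (Int × Int)) (max_offset : Int) : Int × Int × Int :=
  if r_trans = [] ∨ o_trans = [] then (0, 0, 0) else
  let b := (PySem.List.pyRange (-max_offset) (max_offset + 1) 1).foldl
    (fun (b : Int × Int) offset =>
      let score := r_trans.foldl (fun s rm => s + pvInnerA o_trans (rm.1 + offset) rm.2) 0
      if score > b.2 then (offset, score) else b) (0, 0)
  (b.1, b.2, (r_trans.length : Int))

-- ===== PORT B =====
-- the set 'good' of offsets (clamped to [-max_offset, max_offset]) at which (r_frame, r_mode) matches some o transition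
def pvGood (o_trans : List (Int × Int)) (r_frame r_mode max_offset : Int) : PySem.Set Int :=
  o_trans.foldl (fun good om =>
    if om.2 = r_mode then
      (PySem.List.pyRange (om.1 - r_frame - 2) (om.1 - r_frame + 3) 1).foldl
        (fun g off => if -max_offset ≤ off ∧ off ≤ max_offset then PySem.Set.add g off else g) good
    else good) PySem.Set.empty

def find_alignment_py_alt (r_trans : List (Int × Int)) (o_trans : List (Int × Int)) (max_offset : Int) : Int × Int × Int :=
  if r_trans = [] ∨ o_trans = [] then (0, 0, 0) else
  let counts : PySem.Dict Int Int := r_trans.foldl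
    (fun d rm => (pvGood o_trans rm.1 rm.2 max_offset).foldl (fun d off => d.modify off 0 (· + 1)) d)
    PySem.Dict.empty
  let b := (PySem.List.pyRange (-max_offset) (max_offset + 1) 1).foldl
    (fun (b : Int × Int) off =>
      let s := counts.getD off 0
      if s > b.2 then (off, s) else b) (0, 0)
  (b.1, b.2, (r_trans.length : Int))

-- ===== PRECONDITION & SPEC =====
def Spec_find_alignment_py (r_trans : List (Int × Int)) (o_trans : List (Int × Int)) (max_offset : Int) (out : Int × Int × Int) : Prop := out = find_alignment_py_alt r_trans o_trans max_offset
instance (r_trans : List (Int × Int)) (o_trans : List (Int × Int)) (max_offset : Int) (out : Int × Int × Int) : Decidable (Spec_find_alignment_py r_trans o_trans max_offset out) := by unfold Spec_find_alignment_py; infer_instance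

-- ===== CLAIM (what is proved, stated in full; the proofs are below) =====
def Claim_equal_find_alignment_py : Prop := ∀ (r_trans : List (Int × Int)) (o_trans : List (Int × Int)) (max_offset : Int), Dom_find_alignment_py r_trans o_trans max_offset → Spec_find_alignment_py r_trans o_trans max_offset (find_alignment_py r_trans o_trans max_offset)

-- ===== LEMMAS AND PROOFS =====

-- the per-(r,offset) match predicate both sides compute
def pvMatch (o_trans : List (Int × Int)) (off : Int) (rm : Int × Int) : Bool :=
  o_trans.any (fun om => decide (|om.1 - (rm.1 + off)| ≤ 2 ∧ om.2 = rm.2))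

theorem pvInnerA_eq_any (o : List (Int × Int)) (target r_mode : Int) :
    pvInnerA o target r_mode =
      if o.any (fun om => decide (|om.1 - target| ≤ 2 ∧ om.2 = r_mode)) then 1 else 0 := by
  induction o with
  | nil => simp [pvInnerA]
  | cons om rest ih =>
    simp only [pvInnerA, List.any_cons, ih]
    by_cases h : |om.1 - target| ≤ 2 ∧ om.2 = r_mode
    · simp [h]
    · simp only [decide_eq_false h, Bool.false_or]
      rw [if_neg h]

theorem foldl_add_ite_countP (p : (Int × Int) → Bool) (r : List (Int × Int)) (s0 : Int) :
    r.foldl (fun s rm => s + (if p rm then 1 else 0)) s0 = s0 + (r.countP p : Int) := by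
  induction r generalizing s0 with
  | nil => simp
  | cons rm rest ih =>
    simp only [List.foldl_cons, ih, List.countP_cons]
    by_cases h : p rm <;> simp [h] <;> try ring

theorem mem_foldl_add_if (q : Int → Prop) [DecidablePred q] (l : List Int)
    (g : PySem.Set Int) (x : Int) :
    x ∈ l.foldl (fun g y => if q y then PySem.Set.add g y else g) g ↔
      x ∈ g ∨ (x ∈ l ∧ q x) := by
  induction l generalizing g with
  | nil => simp
  | cons y rest ih =>
    simp only [List.foldl_cons]
    by_cases h : q y
    · simp only [if_pos h, ih, PySem.Set.mem_add, List.mem_cons]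
      constructor
      · rintro ((hg | rfl) | hr)
        · exact Or.inl hg
        · exact Or.inr ⟨Or.inl rfl, h⟩
        · exact Or.inr ⟨Or.inr hr.1, hr.2⟩
      · rintro (hg | ⟨(rfl | hm), hq⟩)
        · exact Or.inl (Or.inl hg)
        · exact Or.inl (Or.inr rfl)
        · exact Or.inr ⟨hm, hq⟩
    · simp only [if_neg h, ih, List.mem_cons]
      constructor
      · rintro (hg | hr)
        · exact Or.inl hg
        · exact Or.inr ⟨Or.inr hr.1, hr.2⟩
      · rintro (hg | ⟨(rfl | hm), hq⟩)
        · exact Or.inl hg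
        · exact absurd hq h
        · exact Or.inr ⟨hm, hq⟩

theorem nodup_foldl_add_if (q : Int → Prop) [DecidablePred q] (l : List Int)
    (g : PySem.Set Int) (hg : g.Nodup) :
    (l.foldl (fun g y => if q y then PySem.Set.add g y else g) g).Nodup := by
  induction l generalizing g with
  | nil => exact hg
  | cons y rest ih =>
    simp only [List.foldl_cons]
    by_cases h : q y
    · simp only [if_pos h]; exact ih _ (PySem.Set.nodup_add _ _ hg)
    · simp only [if_neg h]; exact ih _ hg

theorem mem_pvGood (o : List (Int × Int)) (rf rm mx x : Int) :
    x ∈ pvGood o rf rm mx ↔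
      (-mx ≤ x ∧ x ≤ mx) ∧ ∃ om ∈ o, om.2 = rm ∧ |om.1 - (rf + x)| ≤ 2 := by
  unfold pvGood
  suffices h : ∀ g : PySem.Set Int,
      x ∈ o.foldl (fun good om =>
        if om.2 = rm then
          (PySem.List.pyRange (om.1 - rf - 2) (om.1 - rf + 3) 1).foldl
            (fun g off => if -mx ≤ off ∧ off ≤ mx then PySem.Set.add g off else g) good
        else good) g ↔
      x ∈ g ∨ ((-mx ≤ x ∧ x ≤ mx) ∧ ∃ om ∈ o, om.2 = rm ∧ |om.1 - (rf + x)| ≤ 2 ) by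
    rw [h]
    simp [PySem.Set.empty]
  intro g
  induction o generalizing g with
  | nil => simp
  | cons om rest ih =>
    simp only [List.foldl_cons]
    by_cases h : om.2 = rm
    · rw [if_pos h, ih, mem_foldl_add_if, PySem.List.mem_pyRange_one]
      constructor
      · rintro ((hg | ⟨hr, hq⟩) | hrest)
        · exact Or.inl hg
        · exact Or.inr ⟨hq, om, List.mem_cons_self, h, by rw [abs_le]; omega⟩
        · obtain ⟨hb, om', hm, hrest'⟩ := hrest
          exact Or.inr ⟨hb, om', List.mem_cons_of_mem _ hm, hrest'⟩
      · rintro (hg | ⟨hb, om', hm, hmode, habs⟩)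
        · exact Or.inl (Or.inl hg)
        · rcases List.mem_cons.mp hm with rfl | hm'
          · rw [abs_le] at habs
            exact Or.inl (Or.inr ⟨by omega, hb⟩)
          · exact Or.inr ⟨hb, om', hm', hmode, habs⟩
    · rw [if_neg h, ih]
      constructor
      · rintro (hg | ⟨hb, om', hm, hrest'⟩)
        · exact Or.inl hg
        · exact Or.inr ⟨hb, om', List.mem_cons_of_mem _ hm, hrest'⟩
      · rintro (hg | ⟨hb, om', hm, hmode, habs⟩)
        · exact Or.inl hg
        · rcases List.mem_cons.mp hm with rfl | hm'
          · exact absurd hmode h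
          · exact Or.inr ⟨hb, om', hm', hmode, habs⟩

theorem nodup_pvGood (o : List (Int × Int)) (rf rm mx : Int) : (pvGood o rf rm mx).Nodup := by
  unfold pvGood
  suffices h : ∀ g : PySem.Set Int, g.Nodup →
      (o.foldl (fun good om =>
        if om.2 = rm then
          (PySem.List.pyRange (om.1 - rf - 2) (om.1 - rf + 3) 1).foldl
            (fun g off => if -mx ≤ off ∧ off ≤ mx then PySem.Set.add g off else g) good
        else good) g).Nodup from h _ List.nodup_nil
  intro g hg
  induction o generalizing g with
  | nil => exact hg
  | cons om rest ih =>
    simp only [List.foldl_cons]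
    by_cases h : om.2 = rm
    · rw [if_pos h]; exact ih _ (nodup_foldl_add_if _ _ _ hg)
    · rw [if_neg h]; exact ih _ hg

theorem count_pvGood (o : List (Int × Int)) (rf rm mx x : Int) :
    (pvGood o rf rm mx).count x = if x ∈ pvGood o rf rm mx then 1 else 0 := by
  by_cases h : x ∈ pvGood o rf rm mx
  · rw [if_pos h]; exact List.count_eq_one_of_mem (nodup_pvGood o rf rm mx) h
  · rw [if_neg h]; exact List.count_eq_zero.mpr h

theorem getD_counts (o : List (Int × Int)) (mx : Int) (r : List (Int × Int))
    (d : PySem.Dict Int Int) (x : Int) :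
    (r.foldl (fun d rm => (pvGood o rm.1 rm.2 mx).foldl
        (fun d off => d.modify off 0 (· + 1)) d) d).getD x 0 =
      d.getD x 0 + (r.countP (fun rm => decide (x ∈ pvGood o rm.1 rm.2 mx)) : Int) := by
  induction r generalizing d with
  | nil => simp
  | cons rm rest ih =>
    simp only [List.foldl_cons, ih, List.countP_cons]
    rw [PySem.Dict.getD_foldl_modify_add_one, count_pvGood]
    by_cases h : x ∈ pvGood o rm.1 rm.2 mx <;> simp [h] <;> try ring

theorem countP_pvGood_eq (o : List (Int × Int)) (mx x : Int) (r : List (Int × Int))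
    (hx : -mx ≤ x ∧ x ≤ mx) :
    r.countP (fun rm => decide (x ∈ pvGood o rm.1 rm.2 mx)) = r.countP (pvMatch o x) := by
  apply List.countP_congr
  intro rm _
  simp only [decide_eq_true_eq, mem_pvGood, pvMatch, List.any_eq_true, decide_eq_true_eq]
  constructor
  · rintro ⟨_, om, hm, hmode, habs⟩; exact ⟨om, hm, habs, hmode⟩
  · rintro ⟨om, hm, habs, hmode⟩; exact ⟨hx, om, hm, hmode, habs⟩

theorem score_eq (o : List (Int × Int)) (r : List (Int × Int)) (off : Int) :
    r.foldl (fun s rm => s + pvInnerA o (rm.1 + off) rm.2) 0 = (r.countP (pvMatch o off) : Int) := by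
  have h : ∀ rm : Int × Int, pvInnerA o (rm.1 + off) rm.2 = if pvMatch o off rm then 1 else 0 := by
    intro rm; rw [pvInnerA_eq_any]; rfl
  calc r.foldl (fun s rm => s + pvInnerA o (rm.1 + off) rm.2) 0
      = r.foldl (fun s rm => s + (if pvMatch o off rm then 1 else 0)) 0 := by
        apply PySem.List.foldl_congr_mem; intro acc rm _; rw [h]
    _ = (r.countP (pvMatch o off) : Int) := by rw [foldl_add_ite_countP]; ring

-- ===== VERDICT (by name: the statement is the Claim_ definition above) =====
theorem find_alignment_py_spec : Claim_equal_find_alignment_py := by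
  intro r o mx _
  unfold Spec_find_alignment_py find_alignment_py find_alignment_py_alt
  by_cases hro : r = [] ∨ o = []
  · rw [if_pos hro, if_pos hro]
  · rw [if_neg hro, if_neg hro]
    have hfold : (PySem.List.pyRange (-mx) (mx + 1) 1).foldl
        (fun (b : Int × Int) offset =>
          let score := r.foldl (fun s rm => s + pvInnerA o (rm.1 + offset) rm.2) 0
          if score > b.2 then (offset, score) else b) (0, 0) =
      (PySem.List.pyRange (-mx) (mx + 1) 1).foldl
        (fun (b : Int × Int) off =>
          let s := (r.foldl (fun d rm => (pvGood o rm.1 rm.2 mx).foldl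
              (fun d off => d.modify off 0 (· + 1)) d) PySem.Dict.empty).getD off 0
          if s > b.2 then (off, s) else b) (0, 0) := by
      apply PySem.List.foldl_congr_mem
      intro acc off hoff
      have hb := (PySem.List.mem_pyRange_one).mp hoff
      have hsc : r.foldl (fun s rm => s + pvInnerA o (rm.1 + off) rm.2) 0 =
          (r.foldl (fun d rm => (pvGood o rm.1 rm.2 mx).foldl
              (fun d off => d.modify off 0 (· + 1)) d) PySem.Dict.empty).getD off 0 := by
        rw [score_eq, getD_counts, countP_pvGood_eq o mx off r (by omega)]
        simp
      simp only [hsc]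
    simp only [hfold]
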